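-- pv_equiv track=rewrite | github.com/BigAngryDinosaur/amazonoa | color_palette/solution.py | maxPalette
-- ===== SOURCE A (Python) =====
-- def maxPalette(colors, paletteSize, threshold):
--     """
--     :type colors: List[int]
--     :type paletteSize: int
--     :type threshold: int
--     :rtype: int
--     """
--     colors.sort()
--     res = 0
--     start, end = 0, paletteSize - 1
--
--     while end < len(colors):
--         diff = colors[end] - colors[start]
--         if diff <= threshold:
--             res += 1
--             start += paletteSize
--             end += paletteSize
--         else:
--             start += 1
--             end += 1
--
--     return res
-- ===== SOURCE B (Python) =====
-- def maxPalette(colors, paletteSize, threshold):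
--     """
--     :type colors: List[int]
--     :type paletteSize: int
--     :type threshold: int
--     :rtype: int
--     """
--     colors.sort()
--     n = len(colors)
--     # dp[m] = best count achievable using only the m largest colors (the suffix of length m)
--     dp = [0]
--     for m in range(1, n + 1):
--         i = n - m
--         best = dp[m - 1]
--         if paletteSize <= m and colors[i + paletteSize - 1] - colors[i] <= threshold:
--             best = max(best, 1 + dp[m - paletteSize])
--         dp.append(best)
--     return dp[n]
-- ===== Notes on version B (the rewrite author's own statement) =====
-- stated objective: alternative
-- what changed: Replaces A's greedy sliding-window scan (two moving pointers over the sorted list) with a bottom-up dynamic program over suffix lengths (dp[m] = best count using the m largest colors), proved equal to the greedy via an exchange argument; both mutate colors via colors.sort().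
import Mathlib
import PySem

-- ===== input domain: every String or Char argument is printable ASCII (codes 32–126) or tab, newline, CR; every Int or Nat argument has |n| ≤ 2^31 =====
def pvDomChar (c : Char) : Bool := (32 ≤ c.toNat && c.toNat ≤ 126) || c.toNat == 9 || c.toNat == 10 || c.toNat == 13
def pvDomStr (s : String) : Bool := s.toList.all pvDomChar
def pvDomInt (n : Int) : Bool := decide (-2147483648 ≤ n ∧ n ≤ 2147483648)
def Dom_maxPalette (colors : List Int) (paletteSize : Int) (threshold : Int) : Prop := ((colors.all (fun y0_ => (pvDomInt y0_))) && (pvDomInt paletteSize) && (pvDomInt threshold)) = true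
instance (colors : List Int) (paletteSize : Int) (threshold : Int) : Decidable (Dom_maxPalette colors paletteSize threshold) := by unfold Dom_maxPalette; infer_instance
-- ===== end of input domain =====

-- B replaces A's greedy sliding-window scan with a suffix-length dynamic program (an
-- alternative algorithm of the same cost); both A and B sort `colors` in place, and the
-- equivalence proved here is about the return value (the in-place sort side effect is identical).

-- ===== PORT A =====
-- A's while loop: fuel-based tail recursion; `none` from pyGet? = Python IndexError,
-- reachable only outside Pre_ (paletteSize ≤ 0), where A never returns normally.
def pvLoopA (s : List Int) (n pS thr : Int) : Nat → Int → Int → Int → Int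
  | 0, res, _, _ => res
  | fuel+1, res, start, end_ =>
    if end_ < n then
      match PySem.List.pyGet? s end_, PySem.List.pyGet? s start with
      | some ce, some cs =>
        if ce - cs ≤ thr then pvLoopA s n pS thr fuel (res+1) (start+pS) (end_+pS)
        else pvLoopA s n pS thr fuel res (start+1) (end_+1)
      | _, _ => res
    else res

def maxPalette (colors : List Int) (paletteSize : Int) (threshold : Int) : Int :=
  let s := PySem.List.sorted colors (fun x => x) false
  pvLoopA s s.length paletteSize threshold (s.length + 1) 0 0 (paletteSize - 1)

-- ===== PORT B =====
-- body of Source B's `for m in range(1, n+1)` loop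
def pvStepB (s : List Int) (n pS thr : Int) (dp : List Int) (m : Int) : List Int :=
  let i := n - m
  let best := PySem.List.pyGetD dp (m - 1) 0
  let best := if pS ≤ m ∧ PySem.List.pyGetD s (i + pS - 1) 0 - PySem.List.pyGetD s i 0 ≤ thr
              then max best (1 + PySem.List.pyGetD dp (m - pS) 0) else best
  dp ++ [best]

def maxPalette_alt (colors : List Int) (paletteSize : Int) (threshold : Int) : Int :=
  let s := PySem.List.sorted colors (fun x => x) false
  let n : Int := s.length
  let dp := (PySem.List.pyRange 1 (n + 1) 1).foldl (pvStepB s n paletteSize threshold) [0]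
  PySem.List.pyGetD dp n 0

-- ===== PRECONDITION & SPEC =====
-- Pre_ excludes paletteSize ≤ 0, on which A never returns: it either raises IndexError
-- (its indices run off the list) or loops forever (start/end stop advancing).
def Pre_maxPalette (colors : List Int) (paletteSize : Int) (threshold : Int) : Prop :=
  1 ≤ paletteSize

instance (colors : List Int) (paletteSize : Int) (threshold : Int) : Decidable (Pre_maxPalette colors paletteSize threshold) := by unfold Pre_maxPalette; infer_instance

def pvWitness_maxPalette : List Int × Int × Int := ([1, 5, 2, 4, 3, 9], 2, 1)

def Spec_maxPalette (colors : List Int) (paletteSize : Int) (threshold : Int) (out : Int) : Prop := out = maxPalette_alt colors paletteSize threshold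
instance (colors : List Int) (paletteSize : Int) (threshold : Int) (out : Int) : Decidable (Spec_maxPalette colors paletteSize threshold out) := by unfold Spec_maxPalette; infer_instance

-- ===== CLAIM (what is proved, stated in full; the proofs are below) =====
def Claim_equal_maxPalette : Prop := ∀ (colors : List Int) (paletteSize : Int) (threshold : Int), Dom_maxPalette colors paletteSize threshold → Pre_maxPalette colors paletteSize threshold → Spec_maxPalette colors paletteSize threshold (maxPalette colors paletteSize threshold)

-- ===== LEMMAS AND PROOFS =====

-- feasibility of starting a block where the suffix of length m begins (index n - m)
def pvC (s : List Int) (pS thr : Int) (m : Nat) : Bool :=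
  decide (pS ≤ (m : Int) ∧
    PySem.List.pyGetD s ((s.length : Int) - m + pS - 1) 0 - PySem.List.pyGetD s ((s.length : Int) - m) 0 ≤ thr)

-- DP value on the suffix of length m; block size is k' + 1
def pvDpv (c : Nat → Bool) (k' : Nat) : Nat → Int
  | 0 => 0
  | m+1 => if c (m+1) then max (pvDpv c k' m) (1 + pvDpv c k' (m - k')) else pvDpv c k' m

-- greedy value on the suffix of length m (A's earliest-finish strategy)
def pvGv (c : Nat → Bool) (k' : Nat) : Nat → Int
  | 0 => 0
  | m+1 => if c (m+1) then 1 + pvGv c k' (m - k') else pvGv c k' m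

theorem pvDpv_nonneg (c : Nat → Bool) (k' m : Nat) : 0 ≤ pvDpv c k' m := by
  induction m using Nat.strong_induction_on with
  | _ m ih =>
    match m with
    | 0 => simp [pvDpv]
    | m+1 =>
      simp only [pvDpv]
      split
      · have h1 := ih m (by omega)
        have h2 := ih (m - k') (by omega)
        omega
      · exact ih m (by omega)

theorem pvDpv_le_succ (c : Nat → Bool) (k' m : Nat) : pvDpv c k' m ≤ pvDpv c k' (m+1) := by
  simp only [pvDpv]
  split
  · exact le_max_left _ _
  · exact le_refl _

theorem pvDpv_mono (c : Nat → Bool) (k' : Nat) {m m' : Nat} (h : m ≤ m') :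
    pvDpv c k' m ≤ pvDpv c k' m' := by
  induction m' with
  | zero => simp_all
  | succ t ih =>
    rcases Nat.lt_or_ge m (t+1) with h' | h'
    · exact le_trans (ih (by omega)) (pvDpv_le_succ c k' t)
    · have : m = t+1 := by omega
      simp [this]

theorem pvDpv_step (c : Nat → Bool) (k' m : Nat) :
    pvDpv c k' m ≤ 1 + pvDpv c k' (m - (k'+1)) := by
  induction m using Nat.strong_induction_on with
  | _ m ih =>
    match m with
    | 0 =>
      have := pvDpv_nonneg c k' (0 - (k'+1))
      simp only [pvDpv]; omega
    | m+1 =>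
      have hmono : pvDpv c k' (m - (k'+1)) ≤ pvDpv c k' (m - k') :=
        pvDpv_mono c k' (by omega)
      have hm : m + 1 - (k'+1) = m - k' := by omega
      have h1 := ih m (by omega)
      simp only [pvDpv, hm]
      split
      · exact max_le (by omega) (by omega)
      · omega

theorem pvGv_eq_pvDpv (c : Nat → Bool) (k' m : Nat) : pvGv c k' m = pvDpv c k' m := by
  induction m using Nat.strong_induction_on with
  | _ m ih =>
    match m with
    | 0 => simp [pvGv, pvDpv]
    | m+1 =>
      simp only [pvGv, pvDpv]
      split
      · rw [ih (m - k') (by omega)]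
        have h1 : pvDpv c k' m ≤ 1 + pvDpv c k' (m - (k'+1)) := pvDpv_step c k' m
        have h2 : pvDpv c k' (m - (k'+1)) ≤ pvDpv c k' (m - k') := pvDpv_mono c k' (by omega)
        omega
      · exact ih m (by omega)

theorem pvGv_zero (c : Nat → Bool) (k' m : Nat) (h : ∀ j, j ≤ m → c j = false) :
    pvGv c k' m = 0 := by
  induction m with
  | zero => simp [pvGv]
  | succ t ih =>
    have h1 := h (t+1) (le_refl _)
    simp only [pvGv, h1, Bool.false_eq_true, if_false]
    exact ih (fun j hj => h j (by omega))

-- A's loop computes the greedy value pvGv on the remaining suffix.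
theorem pvLoopA_eq (s : List Int) (pS thr : Int) (hpS : 1 ≤ pS) :
    ∀ (fuel : Nat) (m : Nat) (res : Int), m ≤ fuel → m ≤ s.length →
      pvLoopA s s.length pS thr fuel res ((s.length : Int) - m) ((s.length : Int) - m + pS - 1)
        = res + pvGv (pvC s pS thr) (pS.toNat - 1) m := by
  intro fuel
  induction fuel with
  | zero =>
    intro m res hf hn
    have hm : m = 0 := by omega
    simp [hm, pvLoopA, pvGv]
  | succ f ih =>
    intro m res hf hn
    match m with
    | 0 =>
      have hcond : ¬ ((s.length : Int) - 0 + pS - 1 < (s.length : Int)) := by omega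
      simp [pvLoopA, hcond, pvGv]
    | t+1 =>
      have hcast : ((t+1 : Nat) : Int) = (t : Int) + 1 := by push_cast; ring
      rw [hcast]
      by_cases hk : pS ≤ (t : Int) + 1
      · -- the window fits: end < len
        have hcond : (s.length : Int) - ((t : Int)+1) + pS - 1 < (s.length : Int) := by omega
        have hn' : (t+1 : Int) ≤ (s.length : Int) := by exact_mod_cast hn
        have hie : (0:Int) ≤ (s.length : Int) - ((t : Int)+1) + pS - 1 := by omega
        have hie2 : (s.length : Int) - ((t : Int)+1) + pS - 1 < (s.length : Int) := hcond
        have his : (0:Int) ≤ (s.length : Int) - ((t : Int)+1) := by omega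
        have his2 : (s.length : Int) - ((t : Int)+1) < (s.length : Int) := by omega
        rw [show (pvLoopA s (↑s.length) pS thr (f+1) res ((s.length : Int) - ((t : Int)+1)) ((s.length : Int) - ((t : Int)+1) + pS - 1)) =
          (if ((s.length : Int) - ((t : Int)+1) + pS - 1) < (s.length:Int) then
            match PySem.List.pyGet? s ((s.length : Int) - ((t : Int)+1) + pS - 1), PySem.List.pyGet? s ((s.length : Int) - ((t : Int)+1)) with
            | some ce, some cs =>
              if ce - cs ≤ thr then pvLoopA s (↑s.length) pS thr f (res+1) ((s.length : Int) - ((t : Int)+1)+pS) ((s.length : Int) - ((t : Int)+1) + pS - 1+pS)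
              else pvLoopA s (↑s.length) pS thr f res ((s.length : Int) - ((t : Int)+1)+1) ((s.length : Int) - ((t : Int)+1) + pS - 1+1)
            | _, _ => res
          else res) from rfl]
        rw [if_pos hcond]
        rw [PySem.List.pyGet?_eq_some_getElem s hie hie2,
            PySem.List.pyGet?_eq_some_getElem s his his2]
        dsimp only
        have hge : PySem.List.pyGetD s ((s.length : Int) - ((t : Int)+1) + pS - 1) 0 = s[((s.length : Int) - ((t : Int)+1) + pS - 1).toNat] :=
          PySem.List.pyGetD_eq_getElem s 0 hie hie2
        have hgs : PySem.List.pyGetD s ((s.length : Int) - ((t : Int)+1)) 0 = s[((s.length : Int) - ((t : Int)+1)).toNat] :=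
          PySem.List.pyGetD_eq_getElem s 0 his his2
        by_cases hth : s[((s.length : Int) - ((t : Int)+1) + pS - 1).toNat] - s[((s.length : Int) - ((t : Int)+1)).toNat] ≤ thr
        · rw [if_pos hth]
          have hc : pvC s pS thr (t+1) = true := by
            unfold pvC
            rw [show ((s.length : Int) - ((t+1 : Nat) : Int) + pS - 1) = ((s.length : Int) - ((t : Int)+1) + pS - 1) by push_cast; ring,
                show ((s.length : Int) - ((t+1 : Nat) : Int)) = ((s.length : Int) - ((t : Int)+1)) by push_cast; ring]
            rw [hge, hgs]
            simp only [decide_eq_true_eq]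
            exact ⟨by exact_mod_cast hk, hth⟩
          have hm' : ((t + 1) - pS.toNat : Nat) ≤ f := by omega
          have hm'' : ((t + 1) - pS.toNat : Nat) ≤ s.length := by omega
          have hstart : (s.length : Int) - ((t : Int)+1) + pS = (s.length : Int) - (((t + 1) - pS.toNat : Nat) : Int) := by
            push_cast; omega
          have hend : (s.length : Int) - ((t : Int)+1) + pS - 1 + pS = (s.length : Int) - (((t + 1) - pS.toNat : Nat) : Int) + pS - 1 := by
            push_cast; omega
          rw [hstart]
          rw [show ((s.length : Int) - ((t + 1 - pS.toNat : Nat) : Int) - 1 + pS) = ((s.length : Int) - ((t + 1 - pS.toNat : Nat) : Int) + pS - 1) by ring]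
          rw [ih _ (res + 1) hm' hm'']
          rw [show (t + 1 - pS.toNat) = t - (pS.toNat - 1) by omega]
          simp only [pvGv, hc, eq_self_iff_true, if_true]
          ring
        · rw [if_neg hth]
          have hc : pvC s pS thr (t+1) = false := by
            unfold pvC
            rw [show ((s.length : Int) - ((t+1 : Nat) : Int) + pS - 1) = ((s.length : Int) - ((t : Int)+1) + pS - 1) by push_cast; ring,
                show ((s.length : Int) - ((t+1 : Nat) : Int)) = ((s.length : Int) - ((t : Int)+1)) by push_cast; ring]
            rw [hge, hgs]
            simp only [decide_eq_false_iff_not]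
            intro hcontra
            exact hth hcontra.2
          have hstart : (s.length : Int) - ((t : Int)+1) + 1 = (s.length : Int) - ((t : Nat) : Int) := by push_cast; ring
          have hend : (s.length : Int) - ((t : Int)+1) + pS - 1 + 1 = (s.length : Int) - ((t : Nat) : Int) + pS - 1 := by push_cast; ring
          rw [hstart, hend, ih t res (by omega) (by omega)]
          simp only [pvGv, hc, Bool.false_eq_true, if_false]
      · -- window does not fit: the loop exits, and the greedy value is 0
        have hcond : ¬ ((s.length : Int) - ((t : Int)+1) + pS - 1 < (s.length : Int)) := by omega
        rw [show (pvLoopA s (↑s.length) pS thr (f+1) res ((s.length : Int) - ((t : Int)+1)) ((s.length : Int) - ((t : Int)+1) + pS - 1)) =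
          (if ((s.length : Int) - ((t : Int)+1) + pS - 1) < (s.length:Int) then
            match PySem.List.pyGet? s ((s.length : Int) - ((t : Int)+1) + pS - 1), PySem.List.pyGet? s ((s.length : Int) - ((t : Int)+1)) with
            | some ce, some cs =>
              if ce - cs ≤ thr then pvLoopA s (↑s.length) pS thr f (res+1) ((s.length : Int) - ((t : Int)+1)+pS) ((s.length : Int) - ((t : Int)+1) + pS - 1+pS)
              else pvLoopA s (↑s.length) pS thr f res ((s.length : Int) - ((t : Int)+1)+1) ((s.length : Int) - ((t : Int)+1) + pS - 1+1)
            | _, _ => res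
          else res) from rfl]
        rw [if_neg hcond]
        rw [pvGv_zero (pvC s pS thr) (pS.toNat - 1) (t+1)]
        · ring
        · intro j hj
          unfold pvC
          simp only [decide_eq_false_iff_not]
          intro hcontra
          have : pS ≤ (j : Int) := hcontra.1
          omega

-- B's fold builds exactly the table of DP values pvDpv 0 .. pvDpv m.
theorem pvFoldB_eq (s : List Int) (pS thr : Int) (hpS : 1 ≤ pS) :
    ∀ (m : Nat), m ≤ s.length →
      (PySem.List.pyRange 1 ((m : Int) + 1) 1).foldl (pvStepB s s.length pS thr) [0]
        = (List.range (m+1)).map (pvDpv (pvC s pS thr) (pS.toNat - 1)) := by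
  intro m
  induction m with
  | zero =>
    intro _
    rw [PySem.List.pyRange_one_eq_nil (by omega)]
    simp [pvDpv]
  | succ t ih =>
    intro hn
    have hsplit : PySem.List.pyRange 1 (((t+1 : Nat) : Int) + 1) 1
        = PySem.List.pyRange 1 ((t : Int) + 1) 1 ++ [((t : Int) + 1)] := by
      rw [show (((t+1 : Nat) : Int) + 1) = ((t : Int) + 1) + 1 by push_cast; ring]
      exact PySem.List.pyRange_one_succ_right (by omega)
    rw [hsplit, List.foldl_append, ih (by omega)]
    simp only [List.foldl_cons, List.foldl_nil]
    unfold pvStepB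
    dsimp only
    have hdp : ∀ (j : Nat), j ≤ t →
        PySem.List.pyGetD ((List.range (t+1)).map (pvDpv (pvC s pS thr) (pS.toNat - 1))) ((j : Int)) 0
          = pvDpv (pvC s pS thr) (pS.toNat - 1) j := by
      intro j hj
      rw [PySem.List.pyGetD_natCast]
      rw [List.getD_eq_getElem?_getD]
      simp [List.getElem?_map, List.getElem?_range, Nat.lt_succ_of_le hj]
    have hidx : ((t : Int) + 1 - 1) = ((t : Nat) : Int) := by ring
    rw [hidx, hdp t (le_refl t)]
    by_cases hc : pS ≤ (t : Int) + 1 ∧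
        PySem.List.pyGetD s ((s.length : Int) - ((t : Int) + 1) + pS - 1) 0 -
          PySem.List.pyGetD s ((s.length : Int) - ((t : Int) + 1)) 0 ≤ thr
    · rw [if_pos hc]
      have hcv : pvC s pS thr (t+1) = true := by
        unfold pvC
        rw [show ((s.length : Int) - ((t+1 : Nat) : Int) + pS - 1) = ((s.length : Int) - ((t : Int) + 1) + pS - 1) by push_cast; ring,
            show ((s.length : Int) - ((t+1 : Nat) : Int)) = ((s.length : Int) - ((t : Int) + 1)) by push_cast; ring]
        simp only [decide_eq_true_eq]
        exact ⟨by exact_mod_cast hc.1, hc.2⟩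
      have hidx2 : ((t : Int) + 1 - pS) = (((t - (pS.toNat - 1)) : Nat) : Int) := by
        push_cast; omega
      rw [hidx2, hdp (t - (pS.toNat - 1)) (by omega)]
      rw [show List.range (t+1+1) = List.range (t+1) ++ [t+1] from List.range_succ, List.map_append]
      congr 1
      simp only [List.map_cons, List.map_nil]
      congr 1
      simp only [pvDpv, hcv, eq_self_iff_true, if_true]
    · rw [if_neg hc]
      have hcv : pvC s pS thr (t+1) = false := by
        unfold pvC
        rw [show ((s.length : Int) - ((t+1 : Nat) : Int) + pS - 1) = ((s.length : Int) - ((t : Int) + 1) + pS - 1) by push_cast; ring,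
            show ((s.length : Int) - ((t+1 : Nat) : Int)) = ((s.length : Int) - ((t : Int) + 1)) by push_cast; ring]
        simp only [decide_eq_false_iff_not]
        exact fun h => hc ⟨by exact_mod_cast h.1, h.2⟩
      rw [show List.range (t+1+1) = List.range (t+1) ++ [t+1] from List.range_succ, List.map_append]
      congr 1
      simp only [List.map_cons, List.map_nil]
      congr 1
      simp only [pvDpv, hcv, Bool.false_eq_true, if_false]

-- ===== VERDICT (by name: the statement is the Claim_ definition above) =====
theorem maxPalette_spec : Claim_equal_maxPalette := by
  intro colors pS thr _ hpre
  unfold Spec_maxPalette maxPalette maxPalette_alt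
  have hpS : 1 ≤ pS := hpre
  set s := PySem.List.sorted colors (fun x => x) false with hs
  have hA := pvLoopA_eq s pS thr hpS (s.length + 1) s.length 0 (by omega) (le_refl _)
  have hstart : ((s.length : Int) - (s.length : Nat)) = 0 := by push_cast; ring
  rw [hstart] at hA
  rw [show ((0:Int) + pS - 1) = pS - 1 by ring] at hA
  rw [hA]
  have hB := pvFoldB_eq s pS thr hpS s.length (le_refl _)
  simp only []
  rw [hB]
  have hget : PySem.List.pyGetD ((List.range (s.length+1)).map (pvDpv (pvC s pS thr) (pS.toNat - 1))) ((s.length : Nat) : Int) 0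
      = pvDpv (pvC s pS thr) (pS.toNat - 1) s.length := by
    rw [PySem.List.pyGetD_natCast, List.getD_eq_getElem?_getD]
    simp [List.getElem?_map, List.getElem?_range]
  rw [hget, pvGv_eq_pvDpv]
  ring
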